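-- pv_equiv track=rewrite | github.com/Astharen/GoogleHashCode2021 | output.py | write_each_intersect
-- ===== SOURCE A (Python) =====
-- def write_each_intersect(intersect_name, dict_streets, order_streets, intersect_id, text):
--     for i in range(2+len(order_streets)):
--         if i == 0:
--             var = intersect_id
--         elif i==1:
--             var = len(order_streets)
--         else:
--             street_name = order_streets[i-2]
--             var = street_name + ' ' + str(dict_streets[street_name])
--         # write_line(var, letter)
--         text = write_all_output(text, var)
--     return text
--
-- def write_all_output(text, var):
--     text += f'{var}\n'
--     return text
-- ===== SOURCE B (Python) =====
-- def write_each_intersect(intersect_name, dict_streets, order_streets, intersect_id, text):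
--     # Recurse on the list of street names: build the streets block tail-first and
--     # prepend each line, then prefix the two fixed header lines and the old text.
--     def block(names):
--         if not names:
--             return ''
--         head = names[0]
--         return f'{head} {dict_streets[head]}\n' + block(names[1:])
--     return text + f'{intersect_id}\n{len(order_streets)}\n' + block(order_streets)
-- ===== Notes on version B (the rewrite author's own statement) =====
-- stated objective: simpler
-- what changed: Replaces A's accumulator loop over range(2+len) with its i==0/i==1/else dispatch by emitting the two headers directly and building the streets block by structural recursion on the name list (suffix built first, each line prepended).
import Mathlib
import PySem

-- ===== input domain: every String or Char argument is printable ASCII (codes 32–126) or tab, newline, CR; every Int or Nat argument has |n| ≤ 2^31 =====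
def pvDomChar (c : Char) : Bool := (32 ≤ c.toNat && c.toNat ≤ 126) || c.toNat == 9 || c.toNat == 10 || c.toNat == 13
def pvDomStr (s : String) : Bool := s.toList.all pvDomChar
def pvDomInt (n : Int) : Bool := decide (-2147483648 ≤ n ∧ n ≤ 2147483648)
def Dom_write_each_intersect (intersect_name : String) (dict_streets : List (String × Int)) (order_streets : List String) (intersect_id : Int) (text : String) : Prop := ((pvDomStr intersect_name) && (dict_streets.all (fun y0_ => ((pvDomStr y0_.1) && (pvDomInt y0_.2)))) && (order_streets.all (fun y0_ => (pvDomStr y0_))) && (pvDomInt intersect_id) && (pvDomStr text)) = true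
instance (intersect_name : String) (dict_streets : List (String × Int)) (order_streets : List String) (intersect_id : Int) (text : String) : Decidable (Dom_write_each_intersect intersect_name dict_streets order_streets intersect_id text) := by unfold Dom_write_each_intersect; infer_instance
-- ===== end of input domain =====

-- B emits the two header lines directly and builds the streets block by structural
-- recursion on the name list, removing A's range-index loop with its i==0/i==1/else
-- dispatch over a growing accumulator (objective: simpler).

-- ===== PORT A =====
def write_each_intersect (intersect_name : String) (dict_streets : List (String × Int)) (order_streets : List String) (intersect_id : Int) (text : String) : String :=
  (PySem.List.pyRange 0 (2 + (order_streets.length : Int)) 1).foldl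
    (fun text i =>
      let var : String :=
        if i == 0 then PySem.Int.toStr intersect_id
        else if i == 1 then PySem.Int.toStr (order_streets.length : Int)
        else
          let street_name := PySem.List.pyGetD order_streets (i - 2) ""
          -- dict_streets[street_name]: assoc-list first-match lookup; total form getD 0,
          -- exact under Pre_ (KeyError excluded there)
          street_name ++ " " ++ PySem.Int.toStr ((dict_streets.lookup street_name).getD 0)
      text ++ var ++ "\n")     -- write_all_output: text += f'{var}\n'
    text

-- ===== PORT B =====
-- Source B's inner 'block': structural recursion on the name list, suffix first, line prepended
def pvBlock (dict_streets : List (String × Int)) : List String → String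
  | [] => ""
  | head :: rest =>
      head ++ " " ++ PySem.Int.toStr ((dict_streets.lookup head).getD 0) ++ "\n"
        ++ pvBlock dict_streets rest

def write_each_intersect_alt (intersect_name : String) (dict_streets : List (String × Int)) (order_streets : List String) (intersect_id : Int) (text : String) : String :=
  text ++ (PySem.Int.toStr intersect_id ++ "\n" ++ PySem.Int.toStr (order_streets.length : Int) ++ "\n")
       ++ pvBlock dict_streets order_streets

-- ===== PRECONDITION & SPEC =====
-- Pre_ excludes exactly the inputs where Python A raises KeyError: a street name in
-- order_streets that is not a key of dict_streets.
def Pre_write_each_intersect (intersect_name : String) (dict_streets : List (String × Int)) (order_streets : List String) (intersect_id : Int) (text : String) : Prop :=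
  ∀ name ∈ order_streets, name ∈ dict_streets.map Prod.fst
instance (intersect_name : String) (dict_streets : List (String × Int)) (order_streets : List String) (intersect_id : Int) (text : String) : Decidable (Pre_write_each_intersect intersect_name dict_streets order_streets intersect_id text) := by unfold Pre_write_each_intersect; infer_instance
def pvWitness_write_each_intersect : String × (List (String × Int)) × List String × Int × String :=
  ("x", [("s1", 3), ("s2", 4)], ["s2", "s1"], 7, "pre\n")

def Spec_write_each_intersect (intersect_name : String) (dict_streets : List (String × Int)) (order_streets : List String) (intersect_id : Int) (text : String) (out : String) : Prop := out = write_each_intersect_alt intersect_name dict_streets order_streets intersect_id text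
instance (intersect_name : String) (dict_streets : List (String × Int)) (order_streets : List String) (intersect_id : Int) (text : String) (out : String) : Decidable (Spec_write_each_intersect intersect_name dict_streets order_streets intersect_id text out) := by unfold Spec_write_each_intersect; infer_instance

-- ===== CLAIM (what is proved, stated in full; the proofs are below) =====
def Claim_equal_write_each_intersect : Prop := ∀ (intersect_name : String) (dict_streets : List (String × Int)) (order_streets : List String) (intersect_id : Int) (text : String), Dom_write_each_intersect intersect_name dict_streets order_streets intersect_id text → Pre_write_each_intersect intersect_name dict_streets order_streets intersect_id text → Spec_write_each_intersect intersect_name dict_streets order_streets intersect_id text (write_each_intersect intersect_name dict_streets order_streets intersect_id text)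

-- ===== LEMMAS AND PROOFS =====

theorem foldl_range_block (ds : List (String × Int)) :
    ∀ (xs : List String) (t : String),
    (List.range xs.length).foldl
      (fun t k => t ++ ((xs.getD k "") ++ " " ++ PySem.Int.toStr ((ds.lookup (xs.getD k "")).getD 0)) ++ "\n") t
      = t ++ pvBlock ds xs := by
  intro xs
  induction xs with
  | nil => intro t; simp [pvBlock]
  | cons x xs ih =>
    intro t
    rw [List.length_cons, List.range_succ_eq_map, List.foldl_cons, List.foldl_map]
    simp only [List.getD_cons_zero, List.getD_cons_succ, Nat.succ_eq_add_one]
    rw [ih]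
    simp [pvBlock, String.append_assoc]

-- ===== VERDICT (by name: the statement is the Claim_ definition above) =====
theorem write_each_intersect_spec : Claim_equal_write_each_intersect := by
  unfold Claim_equal_write_each_intersect
  intro intersect_name dict_streets order_streets intersect_id text _ _
  unfold Spec_write_each_intersect write_each_intersect write_each_intersect_alt
  have h0 : (0:Int) < 2 + (order_streets.length : Int) := by positivity
  rw [PySem.List.pyRange_one_cons h0, PySem.List.pyRange_one_cons (by omega : (0:Int)+1 < 2 + (order_streets.length : Int))]
  simp only [List.foldl_cons]
  norm_num
  -- drop the dead i==0 / i==1 branches inside the remaining fold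
  rw [PySem.List.foldl_congr_mem _ _
    (fun t i => t ++ ((PySem.List.pyGetD order_streets (i - 2) "") ++ " " ++
        PySem.Int.toStr ((dict_streets.lookup (PySem.List.pyGetD order_streets (i - 2) "")).getD 0)) ++ "\n") _
    (by
      intro acc i hi
      rw [PySem.List.mem_pyRange_one] at hi
      have hne0 : i ≠ (0:Int) := by omega
      have hne1 : i ≠ (1:Int) := by omega
      simp [hne0, hne1])]
  -- turn pyRange 2 (2+n) into List.range n and pyGetD into getD
  rw [PySem.List.pyRange_one, List.foldl_map]
  have hlen : ((2:Int) + (order_streets.length : Int) - 2).toNat = order_streets.length := by omega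
  rw [hlen]
  rw [PySem.List.foldl_congr_mem _ _
    (fun t k => t ++ ((order_streets.getD k "") ++ " " ++
        PySem.Int.toStr ((dict_streets.lookup (order_streets.getD k "")).getD 0)) ++ "\n") _
    (by
      intro t k _
      rw [show (2:Int) + (k:Int) - 2 = (k:Int) by omega, PySem.List.pyGetD_natCast])]
  rw [foldl_range_block]
  simp [String.append_assoc]
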